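-- pv_equiv track=rewrite | github.com/Franna88/medwave | get_two_sample_opportunities.py | extract_attribution_fields
-- ===== SOURCE A (Python) =====
-- def extract_attribution_fields(attributions):
--     """Extract all possible ID fields from attributions"""
--     result = {
--         'h_ad_id': None,
--         'utmAdId': None,
--         'adId': None,
--         'utmCampaignId': None,
--         'fbc_id': None,
--     }
--
--     for attr in reversed(attributions):
--         if not result['h_ad_id']:
--             result['h_ad_id'] = attr.get('h_ad_id')
--         if not result['utmAdId']:
--             result['utmAdId'] = attr.get('utmAdId')
--         if not result['adId']:
--             result['adId'] = attr.get('adId')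
--         if not result['utmCampaignId']:
--             result['utmCampaignId'] = attr.get('utmCampaignId')
--         if not result['fbc_id']:
--             result['fbc_id'] = attr.get('fbc_id')
--
--     return result
-- ===== SOURCE B (Python) =====
-- FIELDS = ('h_ad_id', 'utmAdId', 'adId', 'utmCampaignId', 'fbc_id')
--
-- def extract_attribution_fields(attributions):
--     """Extract all possible ID fields from attributions"""
--     result = {}
--     for field in FIELDS:
--         value = None
--         for attr in reversed(attributions):
--             value = attr.get(field)
--             if value:
--                 break
--         result[field] = value
--     return result
-- ===== Notes on version B (the rewrite author's own statement) =====
-- stated objective: simpler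
-- what changed: Replaces A's single simultaneous pass that conditionally updates all five dict fields per attribution with a per-field search: for each field name, scan reversed(attributions) assigning attr.get(field) and breaking at the first truthy value.
import Mathlib
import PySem

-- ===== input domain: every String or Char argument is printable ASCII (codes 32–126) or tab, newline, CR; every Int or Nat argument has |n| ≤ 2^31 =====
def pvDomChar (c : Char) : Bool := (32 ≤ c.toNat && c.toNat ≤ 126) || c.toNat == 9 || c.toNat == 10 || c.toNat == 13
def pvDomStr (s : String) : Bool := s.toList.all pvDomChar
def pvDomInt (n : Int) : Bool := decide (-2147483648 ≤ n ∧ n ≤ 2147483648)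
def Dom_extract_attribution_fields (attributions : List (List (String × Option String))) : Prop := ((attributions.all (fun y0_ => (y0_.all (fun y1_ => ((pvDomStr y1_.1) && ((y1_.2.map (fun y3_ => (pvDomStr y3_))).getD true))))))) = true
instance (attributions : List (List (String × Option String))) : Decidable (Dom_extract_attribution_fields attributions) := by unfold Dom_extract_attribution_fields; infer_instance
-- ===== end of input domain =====

-- B replaces A's one simultaneous five-field pass by a per-field inner search (assign, break on truthy),
-- a plainer decomposition with the same cost; return value only, A mutates nothing observable.

-- ===== PORT A =====
-- Python truthiness of an Optional[str] value: None and '' are falsy.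
def pvTruthyA (o : Option String) : Bool := match o with | none => false | some s => s != ""
-- attr.get(k) on the dict attr (first-match assoc-list lookup, default None)
def pvGetA (attr : List (String × Option String)) (k : String) : Option String :=
  (PySem.Dict.mk attr).getD k none
-- one iteration of A's loop body (five conditional overwrites)
def pvStepA (d : PySem.Dict String (Option String)) (attr : List (String × Option String)) :
    PySem.Dict String (Option String) :=
  let d := if pvTruthyA (d.getD "h_ad_id" none) then d else d.insert "h_ad_id" (pvGetA attr "h_ad_id")
  let d := if pvTruthyA (d.getD "utmAdId" none) then d else d.insert "utmAdId" (pvGetA attr "utmAdId")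
  let d := if pvTruthyA (d.getD "adId" none) then d else d.insert "adId" (pvGetA attr "adId")
  let d := if pvTruthyA (d.getD "utmCampaignId" none) then d else d.insert "utmCampaignId" (pvGetA attr "utmCampaignId")
  let d := if pvTruthyA (d.getD "fbc_id" none) then d else d.insert "fbc_id" (pvGetA attr "fbc_id")
  d

def extract_attribution_fields (attributions : List (List (String × Option String))) : List (String × Option String) :=
  (attributions.reverse.foldl pvStepA
    (PySem.Dict.mk [("h_ad_id", none), ("utmAdId", none), ("adId", none),
                    ("utmCampaignId", none), ("fbc_id", none)])).items

-- ===== PORT B =====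
def pvFieldsB : List String := ["h_ad_id", "utmAdId", "adId", "utmCampaignId", "fbc_id"]
def pvTruthyB (o : Option String) : Bool := match o with | none => false | some s => s != ""
def pvGetB (attr : List (String × Option String)) (k : String) : Option String :=
  (PySem.Dict.mk attr).getD k none
-- inner loop of B: assign value = attr.get(field) each step, break when truthy
def pvFindB (k : String) (value : Option String) : List (List (String × Option String)) → Option String
  | [] => value
  | attr :: rest =>
    let v := pvGetB attr k
    if pvTruthyB v then v else pvFindB k v rest

def extract_attribution_fields_alt (attributions : List (List (String × Option String))) : List (String × Option String) :=
  pvFieldsB.map (fun field => (field, pvFindB field none attributions.reverse))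

-- ===== PRECONDITION & SPEC =====
def Spec_extract_attribution_fields (attributions : List (List (String × Option String))) (out : List (String × Option String)) : Prop := out = extract_attribution_fields_alt attributions
instance (attributions : List (List (String × Option String))) (out : List (String × Option String)) : Decidable (Spec_extract_attribution_fields attributions out) := by unfold Spec_extract_attribution_fields; infer_instance

-- ===== CLAIM (what is proved, stated in full; the proofs are below) =====
def Claim_equal_extract_attribution_fields : Prop := ∀ (attributions : List (List (String × Option String))), Dom_extract_attribution_fields attributions → Spec_extract_attribution_fields attributions (extract_attribution_fields attributions)

-- ===== LEMMAS AND PROOFS =====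

-- per-field view of A's loop
def pvFoldF (k : String) (v : Option String) (l : List (List (String × Option String))) : Option String :=
  l.foldl (fun cur attr => if pvTruthyA cur then cur else pvGetA attr k) v

-- one conditional overwrite of A's loop body, on the five-key dict shape
lemma pvCond1 (v1 v2 v3 v4 v5 x : Option String) :
    (if pvTruthyA ((PySem.Dict.mk [("h_ad_id", v1), ("utmAdId", v2), ("adId", v3), ("utmCampaignId", v4), ("fbc_id", v5)]).getD "h_ad_id" none) then PySem.Dict.mk [("h_ad_id", v1), ("utmAdId", v2), ("adId", v3), ("utmCampaignId", v4), ("fbc_id", v5)]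
     else (PySem.Dict.mk [("h_ad_id", v1), ("utmAdId", v2), ("adId", v3), ("utmCampaignId", v4), ("fbc_id", v5)]).insert "h_ad_id" x) =
    PySem.Dict.mk [("h_ad_id", if pvTruthyA v1 then v1 else x), ("utmAdId", v2), ("adId", v3), ("utmCampaignId", v4), ("fbc_id", v5)] := by
  have hg : (PySem.Dict.mk [("h_ad_id", v1), ("utmAdId", v2), ("adId", v3), ("utmCampaignId", v4), ("fbc_id", v5)]).getD "h_ad_id" none = v1 := rfl
  rw [hg]
  by_cases h : pvTruthyA v1 = true
  · simp only [h, if_true]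
  · simp only [h]
    rfl

lemma pvCond2 (v1 v2 v3 v4 v5 x : Option String) :
    (if pvTruthyA ((PySem.Dict.mk [("h_ad_id", v1), ("utmAdId", v2), ("adId", v3), ("utmCampaignId", v4), ("fbc_id", v5)]).getD "utmAdId" none) then PySem.Dict.mk [("h_ad_id", v1), ("utmAdId", v2), ("adId", v3), ("utmCampaignId", v4), ("fbc_id", v5)]
     else (PySem.Dict.mk [("h_ad_id", v1), ("utmAdId", v2), ("adId", v3), ("utmCampaignId", v4), ("fbc_id", v5)]).insert "utmAdId" x) =
    PySem.Dict.mk [("h_ad_id", v1), ("utmAdId", if pvTruthyA v2 then v2 else x), ("adId", v3), ("utmCampaignId", v4), ("fbc_id", v5)] := by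
  have hg : (PySem.Dict.mk [("h_ad_id", v1), ("utmAdId", v2), ("adId", v3), ("utmCampaignId", v4), ("fbc_id", v5)]).getD "utmAdId" none = v2 := rfl
  rw [hg]
  by_cases h : pvTruthyA v2 = true
  · simp only [h, if_true]
  · simp only [h]
    rfl

lemma pvCond3 (v1 v2 v3 v4 v5 x : Option String) :
    (if pvTruthyA ((PySem.Dict.mk [("h_ad_id", v1), ("utmAdId", v2), ("adId", v3), ("utmCampaignId", v4), ("fbc_id", v5)]).getD "adId" none) then PySem.Dict.mk [("h_ad_id", v1), ("utmAdId", v2), ("adId", v3), ("utmCampaignId", v4), ("fbc_id", v5)]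
     else (PySem.Dict.mk [("h_ad_id", v1), ("utmAdId", v2), ("adId", v3), ("utmCampaignId", v4), ("fbc_id", v5)]).insert "adId" x) =
    PySem.Dict.mk [("h_ad_id", v1), ("utmAdId", v2), ("adId", if pvTruthyA v3 then v3 else x), ("utmCampaignId", v4), ("fbc_id", v5)] := by
  have hg : (PySem.Dict.mk [("h_ad_id", v1), ("utmAdId", v2), ("adId", v3), ("utmCampaignId", v4), ("fbc_id", v5)]).getD "adId" none = v3 := rfl
  rw [hg]
  by_cases h : pvTruthyA v3 = true
  · simp only [h, if_true]
  · simp only [h]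
    rfl

lemma pvCond4 (v1 v2 v3 v4 v5 x : Option String) :
    (if pvTruthyA ((PySem.Dict.mk [("h_ad_id", v1), ("utmAdId", v2), ("adId", v3), ("utmCampaignId", v4), ("fbc_id", v5)]).getD "utmCampaignId" none) then PySem.Dict.mk [("h_ad_id", v1), ("utmAdId", v2), ("adId", v3), ("utmCampaignId", v4), ("fbc_id", v5)]
     else (PySem.Dict.mk [("h_ad_id", v1), ("utmAdId", v2), ("adId", v3), ("utmCampaignId", v4), ("fbc_id", v5)]).insert "utmCampaignId" x) =
    PySem.Dict.mk [("h_ad_id", v1), ("utmAdId", v2), ("adId", v3), ("utmCampaignId", if pvTruthyA v4 then v4 else x), ("fbc_id", v5)] := by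
  have hg : (PySem.Dict.mk [("h_ad_id", v1), ("utmAdId", v2), ("adId", v3), ("utmCampaignId", v4), ("fbc_id", v5)]).getD "utmCampaignId" none = v4 := rfl
  rw [hg]
  by_cases h : pvTruthyA v4 = true
  · simp only [h, if_true]
  · simp only [h]
    rfl

lemma pvCond5 (v1 v2 v3 v4 v5 x : Option String) :
    (if pvTruthyA ((PySem.Dict.mk [("h_ad_id", v1), ("utmAdId", v2), ("adId", v3), ("utmCampaignId", v4), ("fbc_id", v5)]).getD "fbc_id" none) then PySem.Dict.mk [("h_ad_id", v1), ("utmAdId", v2), ("adId", v3), ("utmCampaignId", v4), ("fbc_id", v5)]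
     else (PySem.Dict.mk [("h_ad_id", v1), ("utmAdId", v2), ("adId", v3), ("utmCampaignId", v4), ("fbc_id", v5)]).insert "fbc_id" x) =
    PySem.Dict.mk [("h_ad_id", v1), ("utmAdId", v2), ("adId", v3), ("utmCampaignId", v4), ("fbc_id", if pvTruthyA v5 then v5 else x)] := by
  have hg : (PySem.Dict.mk [("h_ad_id", v1), ("utmAdId", v2), ("adId", v3), ("utmCampaignId", v4), ("fbc_id", v5)]).getD "fbc_id" none = v5 := rfl
  rw [hg]
  by_cases h : pvTruthyA v5 = true
  · simp only [h, if_true]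
  · simp only [h]
    rfl

-- A's fold keeps the five-key dict shape, each value evolving independently
lemma pvStateA (l : List (List (String × Option String))) :
    ∀ v1 v2 v3 v4 v5 : Option String,
    l.foldl pvStepA (PySem.Dict.mk [("h_ad_id", v1), ("utmAdId", v2), ("adId", v3),
                                    ("utmCampaignId", v4), ("fbc_id", v5)]) =
    PySem.Dict.mk [("h_ad_id", pvFoldF "h_ad_id" v1 l), ("utmAdId", pvFoldF "utmAdId" v2 l),
                   ("adId", pvFoldF "adId" v3 l), ("utmCampaignId", pvFoldF "utmCampaignId" v4 l),
                   ("fbc_id", pvFoldF "fbc_id" v5 l)] := by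
  induction l with
  | nil => intro v1 v2 v3 v4 v5; rfl
  | cons a t ih =>
    intro v1 v2 v3 v4 v5
    have hstep : pvStepA (PySem.Dict.mk [("h_ad_id", v1), ("utmAdId", v2), ("adId", v3),
                                         ("utmCampaignId", v4), ("fbc_id", v5)]) a =
        PySem.Dict.mk [("h_ad_id", if pvTruthyA v1 then v1 else pvGetA a "h_ad_id"),
                       ("utmAdId", if pvTruthyA v2 then v2 else pvGetA a "utmAdId"),
                       ("adId", if pvTruthyA v3 then v3 else pvGetA a "adId"),
                       ("utmCampaignId", if pvTruthyA v4 then v4 else pvGetA a "utmCampaignId"),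
                       ("fbc_id", if pvTruthyA v5 then v5 else pvGetA a "fbc_id")] := by
      simp only [pvStepA]
      rw [pvCond1, pvCond2, pvCond3, pvCond4, pvCond5]
    simp only [List.foldl_cons, hstep, ih]
    simp only [pvFoldF, List.foldl_cons]

lemma pvFoldF_of_truthy (k : String) (v : Option String) (h : pvTruthyA v = true) :
    ∀ l, pvFoldF k v l = v := by
  intro l
  induction l with
  | nil => rfl
  | cons a t ih => simp only [pvFoldF, List.foldl_cons, h, if_pos] at *; exact ih

lemma pvFoldF_eq_findB (k : String) :
    ∀ (l : List (List (String × Option String))) (v : Option String),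
      pvTruthyA v = false → pvFoldF k v l = pvFindB k v l := by
  intro l
  induction l with
  | nil => intro v _; rfl
  | cons a t ih =>
    intro v hv
    simp only [pvFoldF, List.foldl_cons, hv, if_neg, Bool.false_eq_true, not_false_iff]
    show pvFoldF k (pvGetA a k) t = pvFindB k v (a :: t)
    simp only [pvFindB]
    by_cases h : pvTruthyB (pvGetB a k) = true
    · have hA : pvTruthyA (pvGetA a k) = true := h
      rw [pvFoldF_of_truthy k _ hA, if_pos h]; rfl
    · have hA : pvTruthyA (pvGetA a k) = false := by
        revert h; unfold pvTruthyA pvTruthyB pvGetA pvGetB; simp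
      rw [ih _ hA, if_neg h]; rfl

-- ===== VERDICT (by name: the statement is the Claim_ definition above) =====
theorem extract_attribution_fields_spec : Claim_equal_extract_attribution_fields := by
  intro attributions _
  show extract_attribution_fields attributions = extract_attribution_fields_alt attributions
  unfold extract_attribution_fields extract_attribution_fields_alt
  rw [pvStateA]
  have h : ∀ k, pvFoldF k none attributions.reverse = pvFindB k none attributions.reverse :=
    fun k => pvFoldF_eq_findB k _ none rfl
  simp only [pvFieldsB, List.map, h]
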